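-- pv_equiv track=rewrite | github.com/heggria/agent-usage-atlas | src/agent_usage_atlas/aggregation/tool_safety.py | _detect_glob_storm
-- ===== SOURCE A (Python) =====
-- def _count_consecutive_runs(sequence: list[str], predicate, min_run: int) -> int:
--     """Count how many times *predicate* holds for *min_run*+ consecutive items."""
--     violations = 0
--     run = 0
--     for item in sequence:
--         if predicate(item):
--             run += 1
--             if run == min_run:
--                 violations += 1
--         else:
--             run = 0
--     return violations
--
-- def _detect_glob_storm(sequences: dict) -> tuple[int, int]:
--     """5+ consecutive Glob calls."""
--     total = 0
--     sessions = 0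
--     for seq in sequences.values():
--         hits = _count_consecutive_runs(seq, lambda t: t == "Glob", 5)
--         if hits:
--             total += hits
--             sessions += 1
--     return total, sessions
-- ===== SOURCE B (Python) =====
-- def _runs(seq):
--     """Split *seq* into maximal runs of equal items, as (item, run_length) pairs."""
--     runs = []
--     i = 0
--     n = len(seq)
--     while i < n:
--         j = i
--         while j < n and seq[j] == seq[i]:
--             j += 1
--         runs.append((seq[i], j - i))
--         i = j
--     return runs
--
--
-- def _detect_glob_storm(sequences: dict) -> tuple[int, int]:
--     """5+ consecutive Glob calls."""
--     per = [sum(1 for item, length in _runs(seq) if item == "Glob" and length >= 5)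
--            for seq in sequences.values()]
--     return sum(per), sum(1 for h in per if h)
-- ===== Notes on version B (the rewrite author's own statement) =====
-- stated objective: alternative
-- what changed: Replaces the reset-counter scan (run counter fired exactly at min_run) by an explicit run-length encoding: each sequence is split into maximal runs of equal items and the qualifying 'Glob' runs of length >= 5 are counted, with per-sequence totals summed afterwards.
import Mathlib
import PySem

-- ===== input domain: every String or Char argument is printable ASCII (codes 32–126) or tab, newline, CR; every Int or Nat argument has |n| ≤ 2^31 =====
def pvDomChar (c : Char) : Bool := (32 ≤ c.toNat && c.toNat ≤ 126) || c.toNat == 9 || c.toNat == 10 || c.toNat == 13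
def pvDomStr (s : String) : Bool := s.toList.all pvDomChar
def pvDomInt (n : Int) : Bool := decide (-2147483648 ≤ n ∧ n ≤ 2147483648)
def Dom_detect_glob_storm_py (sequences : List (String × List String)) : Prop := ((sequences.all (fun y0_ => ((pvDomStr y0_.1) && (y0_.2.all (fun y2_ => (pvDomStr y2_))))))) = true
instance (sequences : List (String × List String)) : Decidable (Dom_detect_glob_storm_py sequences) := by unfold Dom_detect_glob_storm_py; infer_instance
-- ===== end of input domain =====

-- B replaces A's reset-counter scan by an explicit run-length encoding (maximal runs of
-- equal items, count the 'Glob' runs of length ≥ 5); same cost, alternative decomposition.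

-- ===== PORT A =====
-- _count_consecutive_runs: loop state is (violations, run)
def pvCountConsecutiveRuns (sequence : List String) : Int :=
  (sequence.foldl
    (fun (st : Int × Int) item =>
      if item = "Glob" then
        let run := st.2 + 1
        ((if run = 5 then st.1 + 1 else st.1), run)
      else (st.1, 0))
    (0, 0)).1

def detect_glob_storm_py (sequences : List (String × List String)) : Int × Int :=
  sequences.foldl
    (fun (st : Int × Int) kv =>
      let hits := pvCountConsecutiveRuns kv.2
      if hits ≠ 0 then (st.1 + hits, st.2 + 1) else st)
    (0, 0)

-- ===== PORT B =====
-- _runs: outer while = recursion on the remainder, inner while = takeWhile count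
def pvRuns : List String → List (String × Int)
  | [] => []
  | x :: xs =>
      (x, 1 + ((xs.takeWhile (· == x)).length : Int)) :: pvRuns (xs.dropWhile (· == x))
  termination_by l => l.length
  decreasing_by simpa using Nat.lt_succ_of_le (List.length_dropWhile_le _ _)

-- sum(1 for item, length in _runs(seq) if item == "Glob" and length >= 5)
def pvSumHits : List (String × Int) → Int
  | [] => 0
  | p :: ps => (if p.1 = "Glob" ∧ 5 ≤ p.2 then 1 else 0) + pvSumHits ps

def pvHitsB (seq : List String) : Int := pvSumHits (pvRuns seq)

-- sum(per)
def pvSumInts : List Int → Int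
  | [] => 0
  | h :: t => h + pvSumInts t

-- sum(1 for h in per if h)
def pvCountTruthy : List Int → Int
  | [] => 0
  | h :: t => (if h ≠ 0 then 1 else 0) + pvCountTruthy t

def detect_glob_storm_py_alt (sequences : List (String × List String)) : Int × Int :=
  let per := sequences.map (fun kv => pvHitsB kv.2)
  (pvSumInts per, pvCountTruthy per)

-- ===== PRECONDITION & SPEC =====
def Spec_detect_glob_storm_py (sequences : List (String × List String)) (out : Int × Int) : Prop := out = detect_glob_storm_py_alt sequences
instance (sequences : List (String × List String)) (out : Int × Int) : Decidable (Spec_detect_glob_storm_py sequences out) := by unfold Spec_detect_glob_storm_py; infer_instance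

-- ===== CLAIM (what is proved, stated in full; the proofs are below) =====
def Claim_equal_detect_glob_storm_py : Prop := ∀ (sequences : List (String × List String)), Dom_detect_glob_storm_py sequences → Spec_detect_glob_storm_py sequences (detect_glob_storm_py sequences)

-- ===== LEMMAS AND PROOFS =====

theorem pvRuns_nil : pvRuns [] = [] := by rw [pvRuns]

theorem pvRuns_cons (x : String) (xs : List String) :
    pvRuns (x :: xs)
      = (x, 1 + ((xs.takeWhile (· == x)).length : Int)) :: pvRuns (xs.dropWhile (· == x)) := by
  rw [pvRuns]

-- A's per-sequence count, rewritten as a recursion on (list, current run length)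
def pvAuxA : List String → Int → Int
  | [], _ => 0
  | x :: xs, r =>
      if x = "Glob" then (if r + 1 = 5 then 1 else 0) + pvAuxA xs (r + 1)
      else pvAuxA xs 0

theorem pvFoldA_eq (seq : List String) : ∀ (v r : Int),
    (seq.foldl
      (fun (st : Int × Int) item =>
        if item = "Glob" then
          let run := st.2 + 1
          ((if run = 5 then st.1 + 1 else st.1), run)
        else (st.1, 0))
      (v, r)).1 = v + pvAuxA seq r := by
  induction seq with
  | nil => intro v r; simp [pvAuxA]
  | cons x xs ih =>
      intro v r
      by_cases hx : x = "Glob"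
      · by_cases h5 : r + 1 = 5 <;> simp [hx, h5, pvAuxA, ih] <;> omega
      · simp [hx, pvAuxA, ih]

theorem pvCount_eq_aux (seq : List String) : pvCountConsecutiveRuns seq = pvAuxA seq 0 := by
  simpa [pvCountConsecutiveRuns] using pvFoldA_eq seq 0 0

-- a Glob-run at the front: the counter fires once iff the run reaches 5 from r < 5
theorem pvAuxA_glob (seq : List String) : ∀ r : Int,
    pvAuxA seq r =
      (if r < 5 ∧ 5 ≤ r + ((seq.takeWhile (· == "Glob")).length : Int) then 1 else 0)
        + pvAuxA (seq.dropWhile (· == "Glob")) 0 := by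
  induction seq with
  | nil =>
      intro r
      simp [pvAuxA]
  | cons x xs ih =>
      intro r
      by_cases hx : x = "Glob"
      · subst hx
        have hg : (0:Int) ≤ ((xs.takeWhile (· == "Glob")).length : Int) := Int.natCast_nonneg _
        rw [show pvAuxA ("Glob" :: xs) r = (if r + 1 = 5 then 1 else 0) + pvAuxA xs (r + 1)
              from by simp [pvAuxA]]
        rw [ih (r + 1)]
        simp only [List.takeWhile_cons, List.dropWhile_cons, beq_self_eq_true, ite_true,
          List.length_cons]
        push_cast
        split_ifs <;> omega
      · have hx' : (x == "Glob") = false := by simpa using hx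
        simp [pvAuxA, hx, hx']

-- non-Glob prefix items do not change B's count
theorem pvHitsB_drop (x : String) (hx : x ≠ "Glob") (xs : List String) :
    pvSumHits (pvRuns xs) = pvSumHits (pvRuns (xs.dropWhile (· == x))) := by
  cases xs with
  | nil => simp
  | cons y ys =>
      by_cases hy : y = x
      · subst hy
        rw [pvRuns_cons]
        simp [pvSumHits, hx]
      · have hy' : (y == x) = false := by simpa using hy
        simp [hy']

-- per-sequence equality
theorem pvPerSeq : ∀ seq : List String, pvAuxA seq 0 = pvHitsB seq
  | [] => by simp [pvAuxA, pvHitsB, pvRuns_nil, pvSumHits]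
  | x :: xs => by
      by_cases hx : x = "Glob"
      · subst hx
        have h := pvAuxA_glob ("Glob" :: xs) 0
        have hrec := pvPerSeq (xs.dropWhile (· == "Glob"))
        simp only [List.takeWhile_cons, List.dropWhile_cons, beq_self_eq_true, ite_true,
          List.length_cons] at h
        rw [h]
        simp only [pvHitsB, pvRuns_cons, pvSumHits] at hrec ⊢
        rw [← hrec]
        push_cast
        simp only [true_and]
        split_ifs <;> omega
      · have hrec := pvPerSeq xs
        have step : pvAuxA (x :: xs) 0 = pvAuxA xs 0 := by simp [pvAuxA, hx]
        rw [step, hrec]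
        simp only [pvHitsB, pvRuns_cons, pvSumHits]
        rw [pvHitsB_drop x hx xs]
        simp [hx]
  termination_by seq => seq.length
  decreasing_by
    all_goals simpa using Nat.lt_succ_of_le (List.length_dropWhile_le _ _)

theorem pvCount_eq_hitsB (seq : List String) : pvCountConsecutiveRuns seq = pvHitsB seq := by
  rw [pvCount_eq_aux, pvPerSeq]

-- outer loop invariant
theorem pvOuter (seqs : List (String × List String)) : ∀ (t s : Int),
    seqs.foldl
      (fun (st : Int × Int) kv =>
        let hits := pvCountConsecutiveRuns kv.2
        if hits ≠ 0 then (st.1 + hits, st.2 + 1) else st)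
      (t, s)
    = (t + pvSumInts (seqs.map (fun kv => pvHitsB kv.2)),
       s + pvCountTruthy (seqs.map (fun kv => pvHitsB kv.2))) := by
  induction seqs with
  | nil => intro t s; simp [pvSumInts, pvCountTruthy]
  | cons kv rest ih =>
      intro t s
      simp only [List.foldl_cons, List.map_cons, pvSumInts, pvCountTruthy]
      by_cases h : pvCountConsecutiveRuns kv.2 ≠ 0
      · have h' : pvHitsB kv.2 ≠ 0 := by rwa [pvCount_eq_hitsB] at h
        rw [if_pos h, ih, if_pos h', pvCount_eq_hitsB kv.2]
        simp only [Prod.mk.injEq]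
        exact ⟨by ring, by ring⟩
      · have h0 : pvCountConsecutiveRuns kv.2 = 0 := not_not.mp h
        have h0' : pvHitsB kv.2 = 0 := by rwa [pvCount_eq_hitsB] at h0
        rw [if_neg h, ih, if_neg (by simpa using h0')]
        simp [h0']

-- ===== VERDICT (by name: the statement is the Claim_ definition above) =====
theorem detect_glob_storm_py_spec : Claim_equal_detect_glob_storm_py := by
  intro sequences _
  unfold Spec_detect_glob_storm_py detect_glob_storm_py detect_glob_storm_py_alt
  rw [pvOuter sequences 0 0]
  simp
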